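-- pv_equiv track=rewrite | github.com/Mohit06-28/Network-Scanner | templates/app.py | guess_device_category
-- ===== SOURCE A (Python) =====
-- def guess_device_category(vendor, hostname):
--     v = (vendor or '').lower()
--     h = (hostname or '').lower()
--     if any(x in v for x in ('apple', 'samsung', 'xiaomi', 'google', 'huawei', 'oneplus')):
--         return 'Phone / tablet / consumer'
--     if 'raspberry' in v or 'raspberry' in h:
--         return 'Embedded / IoT'
--     if any(x in v for x in ('cisco', 'netgear', 'tp-link', 'd-link', 'ubiquiti', 'router')):
--         return 'Network / Wi‑Fi infrastructure'
--     if 'vmware' in v or 'virtual' in h or 'xen' in v: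
--         return 'Virtual machine'
--     return 'PC / server / other'
-- ===== SOURCE B (Python) =====
-- # Staged rewrite: instead of an early-return if-chain, evaluate every keyword test,
-- # take the minimum matching priority, and index into the category list.
-- KEYWORDS = (
--     ('apple', 'v', 0), ('samsung', 'v', 0), ('xiaomi', 'v', 0),
--     ('google', 'v', 0), ('huawei', 'v', 0), ('oneplus', 'v', 0),
--     ('raspberry', 'v', 1), ('raspberry', 'h', 1),
--     ('cisco', 'v', 2), ('netgear', 'v', 2), ('tp-link', 'v', 2),
--     ('d-link', 'v', 2), ('ubiquiti', 'v', 2), ('router', 'v', 2),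
--     ('vmware', 'v', 3), ('virtual', 'h', 3), ('xen', 'v', 3),
-- )
-- CATEGORIES = (
--     'Phone / tablet / consumer',
--     'Embedded / IoT',
--     'Network / Wi\u2011Fi infrastructure',
--     'Virtual machine',
--     'PC / server / other',
-- )
--
-- def guess_device_category(vendor, hostname):
--     v = (vendor or '').lower()
--     h = (hostname or '').lower()
--     best = min((p for k, src, p in KEYWORDS if k in (v if src == 'v' else h)),
--                default=len(CATEGORIES) - 1)
--     return CATEGORIES[best]
-- ===== Notes on version B (the rewrite author's own statement) =====
-- stated objective: alternative
-- what changed: A short-circuits through an ordered if-chain of per-category tests; B evaluates every keyword test of one flat (keyword, source, priority) table, takes the minimum matching priority, and indexes into the category list.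
import Mathlib
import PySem

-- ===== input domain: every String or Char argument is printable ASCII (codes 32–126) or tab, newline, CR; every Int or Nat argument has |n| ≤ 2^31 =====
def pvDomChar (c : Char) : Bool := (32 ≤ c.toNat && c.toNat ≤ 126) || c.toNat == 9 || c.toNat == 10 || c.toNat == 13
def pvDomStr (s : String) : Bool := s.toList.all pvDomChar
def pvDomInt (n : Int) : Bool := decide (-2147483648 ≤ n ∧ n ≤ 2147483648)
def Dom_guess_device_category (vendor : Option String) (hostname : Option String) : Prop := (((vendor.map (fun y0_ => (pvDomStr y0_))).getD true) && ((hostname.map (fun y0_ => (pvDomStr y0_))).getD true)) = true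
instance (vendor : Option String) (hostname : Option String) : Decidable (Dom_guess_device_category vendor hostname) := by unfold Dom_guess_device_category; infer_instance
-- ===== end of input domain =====

-- B replaces A's early-return if-chain by two stages: evaluate every keyword test of a flat
-- table, take the minimum matching priority, and index into the category list (objective: alternative).

-- ===== PORT A =====
def guess_device_category (vendor : Option String) (hostname : Option String) : String :=
  let v := PySem.Str.lower (vendor.getD "")
  let h := PySem.Str.lower (hostname.getD "")
  if ["apple", "samsung", "xiaomi", "google", "huawei", "oneplus"].any (fun x => PySem.Str.isIn x v) then
    "Phone / tablet / consumer"
  else if PySem.Str.isIn "raspberry" v || PySem.Str.isIn "raspberry" h then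
    "Embedded / IoT"
  else if ["cisco", "netgear", "tp-link", "d-link", "ubiquiti", "router"].any (fun x => PySem.Str.isIn x v) then
    "Network / Wi‑Fi infrastructure"
  else if PySem.Str.isIn "vmware" v || PySem.Str.isIn "virtual" h || PySem.Str.isIn "xen" v then
    "Virtual machine"
  else
    "PC / server / other"

-- ===== PORT B =====
-- flat keyword table: (keyword, search-hostname?, priority)
def pvKeywords : List (String × Bool × Nat) :=
  [("apple", false, 0), ("samsung", false, 0), ("xiaomi", false, 0),
   ("google", false, 0), ("huawei", false, 0), ("oneplus", false, 0),
   ("raspberry", false, 1), ("raspberry", true, 1),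
   ("cisco", false, 2), ("netgear", false, 2), ("tp-link", false, 2),
   ("d-link", false, 2), ("ubiquiti", false, 2), ("router", false, 2),
   ("vmware", false, 3), ("virtual", true, 3), ("xen", false, 3)]

def pvCategories : List String :=
  ["Phone / tablet / consumer", "Embedded / IoT", "Network / Wi‑Fi infrastructure",
   "Virtual machine", "PC / server / other"]

def guess_device_category_alt (vendor : Option String) (hostname : Option String) : String :=
  let v := PySem.Str.lower (vendor.getD "")
  let h := PySem.Str.lower (hostname.getD "")
  -- min over the priorities of all matching keywords, defaulting to the last index
  let best := (pvKeywords.filterMap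
      (fun e => if PySem.Str.isIn e.1 (if e.2.1 then h else v) then some e.2.2 else none)).foldl
      min (pvCategories.length - 1)
  pvCategories.getD best ""

-- ===== PRECONDITION & SPEC =====
def Spec_guess_device_category (vendor : Option String) (hostname : Option String) (out : String) : Prop := out = guess_device_category_alt vendor hostname
instance (vendor : Option String) (hostname : Option String) (out : String) : Decidable (Spec_guess_device_category vendor hostname out) := by unfold Spec_guess_device_category; infer_instance

-- ===== CLAIM (what is proved, stated in full; the proofs are below) =====
def Claim_equal_guess_device_category : Prop := ∀ (vendor : Option String) (hostname : Option String), Dom_guess_device_category vendor hostname → Spec_guess_device_category vendor hostname (guess_device_category vendor hostname)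

-- ===== LEMMAS AND PROOFS =====
-- the fold step of B, named so the proof can rewrite against it syntactically
def pvStep (v h : String) (x : Nat) (y : String × Bool × Nat) : Nat :=
  if PySem.Str.isIn y.1 (if y.2.1 then h else v) then min x y.2.2 else x

-- folding min over the filterMap is folding pvStep over the table
theorem pv_fold_step (v h : String) (l : List (String × Bool × Nat)) (acc : Nat) :
    (l.filterMap (fun e => if PySem.Str.isIn e.1 (if e.2.1 then h else v) then some e.2.2 else none)).foldl
      min acc = l.foldl (pvStep v h) acc := by
  induction l generalizing acc with
  | nil => rfl
  | cons e l ih =>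
    cases hc : PySem.Str.isIn e.1 (if e.2.1 then h else v) <;>
      simp only [List.filterMap_cons, hc, Bool.false_eq_true, if_false, if_true,
        List.foldl_cons, pvStep, ih]

-- folding pvStep over one constant-priority group is an if-any
theorem pv_group_fold (v h : String) (p : Nat) (ks : List (String × Bool)) (acc : Nat) :
    (ks.map (fun k => (k.1, k.2, p))).foldl (pvStep v h) acc
      = if ks.any (fun k => PySem.Str.isIn k.1 (if k.2 then h else v)) then min acc p else acc := by
  induction ks generalizing acc with
  | nil => simp
  | cons k ks ih =>
    cases hc : PySem.Str.isIn k.1 (if k.2 then h else v) <;>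
      simp only [List.map_cons, List.foldl_cons, List.any_cons, pvStep, hc, Bool.false_eq_true,
        if_false, if_true, Bool.false_or, Bool.true_or, ih] <;>
      first
      | rfl
      | (split <;> omega)

theorem pv_main (vendor hostname : Option String) :
    guess_device_category vendor hostname = guess_device_category_alt vendor hostname := by
  simp only [guess_device_category, guess_device_category_alt]
  rw [show pvKeywords =
      ([("apple",false),("samsung",false),("xiaomi",false),("google",false),("huawei",false),("oneplus",false)].map (fun k => (k.1,k.2,(0:Nat)))) ++
      ([("raspberry",false),("raspberry",true)].map (fun k => (k.1,k.2,(1:Nat)))) ++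
      ([("cisco",false),("netgear",false),("tp-link",false),("d-link",false),("ubiquiti",false),("router",false)].map (fun k => (k.1,k.2,(2:Nat)))) ++
      ([("vmware",false),("virtual",true),("xen",false)].map (fun k => (k.1,k.2,(3:Nat)))) from rfl,
    pv_fold_step, List.foldl_append, List.foldl_append, List.foldl_append,
    pv_group_fold, pv_group_fold, pv_group_fold, pv_group_fold]
  simp only [List.any_cons, List.any_nil, Bool.or_false, Bool.or_assoc, Bool.false_eq_true,
    if_false, if_true]
  by_cases h0 : (PySem.Str.isIn "apple" (PySem.Str.lower (vendor.getD "")) ||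
      (PySem.Str.isIn "samsung" (PySem.Str.lower (vendor.getD "")) ||
        (PySem.Str.isIn "xiaomi" (PySem.Str.lower (vendor.getD "")) ||
          (PySem.Str.isIn "google" (PySem.Str.lower (vendor.getD "")) ||
            (PySem.Str.isIn "huawei" (PySem.Str.lower (vendor.getD "")) ||
              PySem.Str.isIn "oneplus" (PySem.Str.lower (vendor.getD ""))))))) = true <;>
    by_cases h1 : (PySem.Str.isIn "raspberry" (PySem.Str.lower (vendor.getD "")) ||
        PySem.Str.isIn "raspberry" (PySem.Str.lower (hostname.getD ""))) = true <;>
      by_cases h2 : (PySem.Str.isIn "cisco" (PySem.Str.lower (vendor.getD "")) ||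
          (PySem.Str.isIn "netgear" (PySem.Str.lower (vendor.getD "")) ||
            (PySem.Str.isIn "tp-link" (PySem.Str.lower (vendor.getD "")) ||
              (PySem.Str.isIn "d-link" (PySem.Str.lower (vendor.getD "")) ||
                (PySem.Str.isIn "ubiquiti" (PySem.Str.lower (vendor.getD "")) ||
                  PySem.Str.isIn "router" (PySem.Str.lower (vendor.getD ""))))))) = true <;>
        by_cases h3 : (PySem.Str.isIn "vmware" (PySem.Str.lower (vendor.getD "")) ||
            (PySem.Str.isIn "virtual" (PySem.Str.lower (hostname.getD "")) ||
              PySem.Str.isIn "xen" (PySem.Str.lower (vendor.getD "")))) = true <;>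
          simp_all [pvCategories]

-- ===== VERDICT (by name: the statement is the Claim_ definition above) =====
theorem guess_device_category_spec : Claim_equal_guess_device_category := by
  intro vendor hostname _
  exact pv_main vendor hostname
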